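-- pv_equiv track=rewrite | github.com/Happy-ryan/PS | 프로그래머스/lv2/42839. 소수 찾기/소수 찾기.py | dfs
-- ===== SOURCE A (Python) =====
-- def dfs(lev, numbers, d, used, visited, final): # 순열, 중복사용 불가
--     if lev == d:
--         a = int(''.join(visited.copy()))
--         final.add(a)
--         return
--     for i in range(len(numbers)):
--         if used[i] == 0:
--             used[i] = 1
--             visited.append(numbers[i])
--             dfs(lev + 1, numbers, d, used, visited, final)
--             used[i] = 0
--             visited.pop()
--     return final
-- ===== SOURCE B (Python) =====
-- def dfs(lev, numbers, d, used, visited, final):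
--     # Iterative level-by-level expansion of the remaining (d - lev) choices
--     # instead of recursive backtracking.  Like A, mutates `final` in place.
--     if lev == d:
--         final.add(int(''.join(visited)))
--         return
--     if lev > d:
--         return final
--     avail = [numbers[i] for i in range(len(numbers)) if used[i] == 0]
--     partials = [(visited, avail)]
--     for _ in range(d - lev):
--         if not partials:
--             break
--         partials = [(v + [rem[j]], rem[:j] + rem[j + 1:])
--                     for (v, rem) in partials
--                     for j in range(len(rem))]
--     for v, _ in partials:
--         final.add(int(''.join(v)))
--     return final
-- ===== Notes on version B (the rewrite author's own statement) =====
-- stated objective: alternative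
-- what changed: Replaces A's recursive backtracking over a mutable used/visited state by an iterative level-by-level expansion: build the list of available strings once, then expand a worklist of (picked, remaining) partial arrangements (d - lev) times and add every completed join to the set.
import Mathlib
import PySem

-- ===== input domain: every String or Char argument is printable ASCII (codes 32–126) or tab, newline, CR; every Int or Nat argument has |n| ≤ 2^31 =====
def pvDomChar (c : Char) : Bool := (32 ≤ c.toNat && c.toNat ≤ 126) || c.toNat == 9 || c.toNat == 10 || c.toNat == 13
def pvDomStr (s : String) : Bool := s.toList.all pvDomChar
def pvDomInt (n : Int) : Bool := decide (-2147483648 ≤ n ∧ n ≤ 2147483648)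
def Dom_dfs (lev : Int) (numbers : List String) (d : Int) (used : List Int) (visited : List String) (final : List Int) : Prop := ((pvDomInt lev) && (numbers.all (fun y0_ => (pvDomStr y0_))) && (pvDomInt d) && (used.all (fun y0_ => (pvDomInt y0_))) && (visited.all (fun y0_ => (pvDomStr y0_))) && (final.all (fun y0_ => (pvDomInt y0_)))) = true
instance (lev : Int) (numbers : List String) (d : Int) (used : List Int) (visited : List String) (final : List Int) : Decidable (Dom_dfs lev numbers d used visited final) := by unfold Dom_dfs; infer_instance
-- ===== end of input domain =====

-- B replaces A's recursive backtracking by an iterative level-by-level expansion of the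
-- remaining choices (objective: alternative algorithm, similar cost).  Both A and B mutate
-- the set `final` in place; the equivalence proved here is about the RETURN value only.

-- ===== PORT A =====
-- int(''.join(v)) with a getD-0 fallback; the fallback is never hit inside Pre_dfs
def pvVal (s : String) : Int := (PySem.Int.ofStr? s).getD 0

-- the recursive body of A; `final` (a Python set) is the only state that survives a call,
-- `used`/`visited` are restored by A before each return, so they are threaded functionally.
-- fuel is only a termination device: each recursive call turns one 0 in `used` into 1,
-- so `used.count 0 + 1` fuel is never exhausted.
def dfsGo : Nat → Int → List String → Int → List Int → List String → List Int → List Int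
  | 0, _, _, _, _, _, final => final
  | fuel + 1, lev, numbers, d, used, visited, final =>
    if lev = d then
      PySem.Set.add final (pvVal (PySem.Str.join "" visited))
    else
      (List.range numbers.length).foldl
        (fun fin i =>
          if used.getD i 1 = 0 then
            dfsGo fuel (lev + 1) numbers d (used.set i 1) (visited ++ [numbers.getD i ""]) fin
          else fin)
        final

def dfs (lev : Int) (numbers : List String) (d : Int) (used : List Int) (visited : List String) (final : List Int) : Option (List Int) :=
  if lev = d then
    none  -- Python: final.add(int(''.join(visited))); return  → returns None
  else
    some (dfsGo (used.count 0 + 1) lev numbers d used visited final)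

-- ===== PORT B =====
-- the `for _ in range(d - lev)` loop of Source B, with its early break on empty `partials`
def altLoop : Nat → List (List String × List String) → List (List String × List String)
  | 0, ps => ps
  | k + 1, ps =>
    if ps = [] then ps
    else altLoop k
      (ps.flatMap fun p =>
        (List.range p.2.length).map fun j => (p.1 ++ [p.2.getD j ""], p.2.eraseIdx j))

def dfs_alt (lev : Int) (numbers : List String) (d : Int) (used : List Int) (visited : List String) (final : List Int) : Option (List Int) :=
  if lev = d then
    none  -- final.add(int(''.join(visited))); return
  else if d < lev then
    some final
  else
    let avail := ((List.range numbers.length).filter fun i => used.getD i 1 = 0).map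
      fun i => numbers.getD i ""
    let ps := altLoop (d - lev).toNat [(visited, avail)]
    some (ps.foldl (fun f p => PySem.Set.add f (pvVal (PySem.Str.join "" p.1))) final)

-- ===== PRECONDITION & SPEC =====
-- spec-side helpers Pre_dfs quantifies over (used by neither port):
-- the free indices of `used` below `numbers.length`, the available strings,
-- and all k-arrangements (ordered, indices distinct) of a list
def freeIdx (numbers : List String) (used : List Int) : List Nat :=
  (List.range numbers.length).filter fun i => used.getD i 1 = 0

def availL (numbers : List String) (used : List Int) : List String :=
  (freeIdx numbers used).map fun i => numbers.getD i ""

def permsE : List String → Nat → List (List String)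
  | _, 0 => [[]]
  | xs, k + 1 =>
    (List.range xs.length).flatMap fun j =>
      (permsE (xs.eraseIdx j) k).map (xs.getD j "" :: ·)

-- Pre_dfs excludes EXACTLY the inputs on which A raises: IndexError when `used` is shorter
-- than `numbers` (the loop body reads used[i] whenever lev ≠ d), and ValueError from int()
-- when lev = d and the joined `visited` does not parse, or when a completed length-(d-lev)
-- arrangement is reachable whose join (after `visited`) does not parse; on every other
-- input A returns normally and B matches it.  (PySem.Int.ofStr? is exact for Python int().)
def Pre_dfs (lev : Int) (numbers : List String) (d : Int) (used : List Int) (visited : List String) (final : List Int) : Prop :=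
  if lev = d then
    (PySem.Int.ofStr? (PySem.Str.join "" visited)).isSome = true
  else
    numbers.length ≤ used.length ∧
      ((lev < d ∧ d - lev ≤ ((freeIdx numbers used).length : Int)) →
        ∀ p ∈ permsE (availL numbers used) (d - lev).toNat,
          (PySem.Int.ofStr? (PySem.Str.join "" (visited ++ p))).isSome = true)
instance (lev : Int) (numbers : List String) (d : Int) (used : List Int) (visited : List String) (final : List Int) : Decidable (Pre_dfs lev numbers d used visited final) := by unfold Pre_dfs; infer_instance

def pvWitness_dfs : Int × List String × Int × List Int × List String × List Int :=
  (0, ["1", "2"], 2, [0, 0], [], [])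

def Spec_dfs (lev : Int) (numbers : List String) (d : Int) (used : List Int) (visited : List String) (final : List Int) (out : Option (List Int)) : Prop := out = dfs_alt lev numbers d used visited final
instance (lev : Int) (numbers : List String) (d : Int) (used : List Int) (visited : List String) (final : List Int) (out : Option (List Int)) : Decidable (Spec_dfs lev numbers d used visited final out) := by unfold Spec_dfs; infer_instance

-- ===== CLAIM (what is proved, stated in full; the proofs are below) =====
def Claim_equal_dfs : Prop := ∀ (lev : Int) (numbers : List String) (d : Int) (used : List Int) (visited : List String) (final : List Int), Dom_dfs lev numbers d used visited final → Pre_dfs lev numbers d used visited final → Spec_dfs lev numbers d used visited final (dfs lev numbers d used visited final)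

-- ===== LEMMAS AND PROOFS =====

theorem freeIdx_nodup (numbers : List String) (used : List Int) : (freeIdx numbers used).Nodup :=
  List.Nodup.filter _ List.nodup_range

theorem permsE_succ (xs : List String) (k : Nat) :
    permsE xs (k + 1) =
      (List.range xs.length).flatMap fun j =>
        (permsE (xs.eraseIdx j) k).map (xs.getD j "" :: ·) := rfl

theorem foldl_ite_filter {β : Type} (p : Nat → Prop) [DecidablePred p]
    (g : β → Nat → β) (l : List Nat) (init : β) :
    l.foldl (fun a x => if p x then g a x else a) init =
      (l.filter fun x => decide (p x)).foldl g init := by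
  induction l generalizing init with
  | nil => rfl
  | cons x l ih =>
    by_cases hx : p x
    · simp [hx, ih]
    · simp [hx, ih]

theorem foldl_const {α β : Type} (l : List α) (init : β) :
    l.foldl (fun a _ => a) init = init := by
  induction l generalizing init with
  | nil => rfl
  | cons x l ih => exact ih init

theorem getD_zero_lt (used : List Int) (i : Nat) (h : used.getD i 1 = 0) : i < used.length := by
  by_contra hn
  have : used.getD i 1 = 1 := by
    simp [List.getD, List.getElem?_eq_none (by omega : used.length ≤ i)]
  omega

theorem count_set_zero (used : List Int) (i : Nat) (h : used.getD i 1 = 0) :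
    (used.set i 1).count 0 + 1 = used.count 0 := by
  have hlt : i < used.length := getD_zero_lt used i h
  have h0 : used[i] = 0 := by
    have := List.getD_eq_getElem (d := (1:Int)) (l := used) hlt
    omega
  have := List.count_set (a := (1:Int)) (b := (0:Int)) (l := used) (i := i) hlt
  have hc : used.count 0 >= 1 := by
    have : used[i] ∈ used := List.getElem_mem hlt
    have := List.count_pos_iff.mpr (h0 ▸ this)
    omega
  simp [h0] at this
  omega

theorem freeIdx_set (numbers : List String) (used : List Int) (i : Nat)
    (h : used.getD i 1 = 0) :
    freeIdx numbers (used.set i 1) = (freeIdx numbers used).filter (fun t => t ≠ i) := by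
  have hlt : i < used.length := getD_zero_lt used i h
  unfold freeIdx
  rw [List.filter_filter]
  apply List.filter_congr
  intro t _
  by_cases ht : t = i
  · subst ht
    simp [List.getD, List.getElem?_set_self hlt]
  · simp [List.getD, List.getElem?_set_ne (by omega : i ≠ t), ht]

theorem crux_flatMap {β : Type} (I : List Nat) (hI : I.Nodup) (f : Nat → String)
    (G : String → List String → List β) :
    ((List.range I.length).flatMap fun j =>
        G ((I.map f).getD j "") ((I.map f).eraseIdx j)) =
      I.flatMap fun i => G (f i) ((I.filter (fun t => t ≠ i)).map f) := by
  induction I generalizing G with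
  | nil => simp
  | cons a I' ih =>
    have ha : a ∉ I' := (List.nodup_cons.mp hI).1
    have hI' : I'.Nodup := (List.nodup_cons.mp hI).2
    rw [List.length_cons, List.range_succ_eq_map, List.flatMap_cons, List.flatMap_map,
      List.flatMap_cons]
    have hfilter : (a :: I').filter (fun t => decide (t ≠ a)) = I' := by
      rw [List.filter_cons_of_neg (by simp)]
      apply List.filter_eq_self.mpr
      intro t ht
      simp only [decide_eq_true_eq]
      exact fun he => ha (he ▸ ht)
    have head : G ((List.map f (a :: I')).getD 0 "") ((List.map f (a :: I')).eraseIdx 0) =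
        G (f a) (((a :: I').filter (fun t => decide (t ≠ a))).map f) := by
      rw [hfilter]
      simp
    rw [head]
    congr 1
    have tail : ∀ j ∈ List.range I'.length,
        G ((List.map f (a :: I')).getD (Nat.succ j) "")
            ((List.map f (a :: I')).eraseIdx (Nat.succ j)) =
          (fun rest => G ((I'.map f).getD j "") (f a :: rest)) ((I'.map f).eraseIdx j) := by
      intro j _
      simp [List.getD]
    rw [List.flatMap_congr tail]
    rw [ih hI' (fun s rest => G s (f a :: rest))]
    apply List.flatMap_congr
    intro i hi
    have hne : a ≠ i := fun he => ha (he ▸ hi)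
    have hcons : (a :: I').filter (fun t => decide (t ≠ i)) =
        a :: I'.filter (fun t => decide (t ≠ i)) := by
      rw [List.filter_cons_of_pos (by simp [hne])]
    rw [hcons, List.map_cons]

theorem permsE_availL (numbers : List String) (used : List Int) (k : Nat) :
    permsE (availL numbers used) (k + 1) =
      (freeIdx numbers used).flatMap fun i =>
        (permsE (availL numbers (used.set i 1)) k).map (numbers.getD i "" :: ·) := by
  rw [permsE_succ,
    show availL numbers used = (freeIdx numbers used).map (fun i => numbers.getD i "") from rfl,
    List.length_map]
  rw [crux_flatMap (freeIdx numbers used) (freeIdx_nodup numbers used)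
    (fun i => numbers.getD i "") (fun s l => (permsE l k).map (s :: ·))]
  apply List.flatMap_congr
  intro i hi
  have h0 : used.getD i 1 = 0 := by
    have := List.mem_filter.mp hi
    simpa using this.2
  rw [show availL numbers (used.set i 1) =
      (freeIdx numbers (used.set i 1)).map (fun i => numbers.getD i "") from rfl,
    freeIdx_set numbers used i h0]

-- characterisation of A's recursion: it folds Set.add over all arrangements, in DFS order
theorem dfsGo_char (numbers : List String) (d : Int) :
    ∀ (fuel : Nat) (lev : Int) (used : List Int) (visited : List String) (final : List Int),
      used.count 0 + 1 ≤ fuel →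
      dfsGo fuel lev numbers d used visited final =
        (if d < lev then [] else permsE (availL numbers used) (d - lev).toNat).foldl
          (fun f p => PySem.Set.add f (pvVal (PySem.Str.join "" (visited ++ p)))) final := by
  intro fuel
  induction fuel with
  | zero => intro lev used visited final h; omega
  | succ f ih =>
    intro lev used visited final hfuel
    by_cases hld : lev = d
    · subst hld
      simp [dfsGo, permsE]
    · rw [show dfsGo (f + 1) lev numbers d used visited final =
          (List.range numbers.length).foldl
            (fun fin i =>
              if used.getD i 1 = 0 then
                dfsGo f (lev + 1) numbers d (used.set i 1) (visited ++ [numbers.getD i ""]) fin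
              else fin) final from by simp [dfsGo, hld]]
      by_cases hdl : d < lev
      · -- no arrangement can ever be completed: every recursive call returns fin unchanged
        have step : ∀ (fin : List Int), ∀ i ∈ List.range numbers.length,
            (if used.getD i 1 = 0 then
              dfsGo f (lev + 1) numbers d (used.set i 1) (visited ++ [numbers.getD i ""]) fin
            else fin) = fin := by
          intro fin i _
          by_cases h0 : used.getD i 1 = 0
          · have hc := count_set_zero used i h0
            rw [if_pos h0, ih (lev + 1) _ _ _ (by omega)]
            simp [show d < lev + 1 by omega]
          · rw [if_neg h0]
        rw [PySem.List.foldl_congr_mem _ _ (fun fin _ => fin) final step]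
        rw [if_pos hdl, foldl_const]
        rfl
      · -- lev < d: one level of A's loop = one flatMap layer of permsE
        have hlev : lev < d := by omega
        have hK : (d - lev).toNat = (d - (lev + 1)).toNat + 1 := by omega
        have step : ∀ (fin : List Int), ∀ i ∈ List.range numbers.length,
            (if used.getD i 1 = 0 then
              dfsGo f (lev + 1) numbers d (used.set i 1) (visited ++ [numbers.getD i ""]) fin
            else fin) =
            (if used.getD i 1 = 0 then
              ((permsE (availL numbers (used.set i 1)) (d - (lev + 1)).toNat).map
                (numbers.getD i "" :: ·)).foldl
                (fun fn p => PySem.Set.add fn (pvVal (PySem.Str.join "" (visited ++ p)))) fin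
            else fin) := by
          intro fin i _
          by_cases h0 : used.getD i 1 = 0
          · have hc := count_set_zero used i h0
            rw [if_pos h0, if_pos h0, ih (lev + 1) _ _ _ (by omega)]
            rw [if_neg (show ¬ d < lev + 1 by omega), List.foldl_map]
            apply PySem.List.foldl_congr_mem
            intro acc p _
            rw [List.append_assoc]
            rfl
          · rw [if_neg h0, if_neg h0]
        rw [PySem.List.foldl_congr_mem _ _ _ final step]
        rw [foldl_ite_filter (p := fun i => used.getD i 1 = 0)
          (g := fun fin i =>
            ((permsE (availL numbers (used.set i 1)) (d - (lev + 1)).toNat).map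
              (numbers.getD i "" :: ·)).foldl
              (fun fn p => PySem.Set.add fn (pvVal (PySem.Str.join "" (visited ++ p)))) fin)]
        rw [show ((List.range numbers.length).filter fun i => decide (used.getD i 1 = 0)) =
          freeIdx numbers used from rfl]
        rw [← List.foldl_flatMap, ← permsE_availL numbers used, if_neg hdl, hK]

theorem foldl_fst {α β γ : Type} (l : List (α × γ)) (g : β → α → β) (init : β) :
    l.foldl (fun b p => g b p.1) init = (l.map Prod.fst).foldl g init := by
  rw [List.foldl_map]

-- characterisation of B's expansion loop
theorem altLoop_char : ∀ (k : Nat) (ps : List (List String × List String)),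
    (altLoop k ps).map Prod.fst =
      ps.flatMap fun p => (permsE p.2 k).map (fun q => p.1 ++ q) := by
  intro k
  induction k with
  | zero =>
    intro ps
    show ps.map Prod.fst = _
    induction ps with
    | nil => rfl
    | cons p ps ihp =>
      rw [List.map_cons, List.flatMap_cons, ihp]
      simp [permsE]
  | succ k ih =>
    intro ps
    by_cases hps : ps = []
    · subst hps; simp [altLoop]
    · rw [show altLoop (k + 1) ps = altLoop k
          (ps.flatMap fun p =>
            (List.range p.2.length).map fun j => (p.1 ++ [p.2.getD j ""], p.2.eraseIdx j))
          from by simp [altLoop, hps]]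
      rw [ih, List.flatMap_assoc]
      apply List.flatMap_congr
      intro p _
      rw [List.flatMap_map, permsE_succ, List.map_flatMap]
      apply List.flatMap_congr
      intro j _
      rw [List.map_map]
      apply List.map_congr_left
      intro q _
      simp

-- ===== VERDICT (by name: the statement is the Claim_ definition above) =====
theorem dfs_spec : Claim_equal_dfs := by
  intro lev numbers d used visited final _ _
  unfold Spec_dfs dfs dfs_alt
  by_cases hld : lev = d
  · simp [hld]
  · rw [if_neg hld, if_neg hld]
    by_cases hdl : d < lev
    · rw [if_pos hdl, dfsGo_char numbers d _ lev used visited final (le_refl _), if_pos hdl]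
      simp
    · rw [if_neg hdl, dfsGo_char numbers d _ lev used visited final (le_refl _), if_neg hdl]
      congr 1
      rw [show (((List.range numbers.length).filter fun i => used.getD i 1 = 0).map
          fun i => numbers.getD i "") = availL numbers used from rfl]
      rw [foldl_fst (altLoop (d - lev).toNat [(visited, availL numbers used)])
        (fun f s => PySem.Set.add f (pvVal (PySem.Str.join "" s))) final]
      rw [altLoop_char, List.flatMap_singleton, List.foldl_map]
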